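-- pv_equiv track=rewrite | github.com/Kawser-nerd/CLCDSA | Source Codes/AtCoder/arc046/A/4321515.py | a_repdigit
-- ===== SOURCE A (Python) =====
-- def a_repdigit(N):
--     """
--     N???????(??????)??
--     """
--
--     from itertools import repeat
--     count, digit = 1, 0
--     while True:
--         for k in range(1, 10):
--             if count == N:
--                 return ''.join(map(str, repeat(k, digit + 1)))
--             count += 1
--         digit += 1
--     return None
-- ===== SOURCE B (Python) =====
-- def a_repdigit(N):
--     """
--     N???????(??????)??
--     """
--     return str((N - 1) % 9 + 1) * ((N - 1) // 9 + 1)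
-- ===== Notes on version B (the rewrite author's own statement) =====
-- stated objective: faster
-- what changed: replaces the O(N) counting loop with the closed form k=(N-1)%9+1, length=(N-1)//9+1 and string repetition
import Mathlib
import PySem

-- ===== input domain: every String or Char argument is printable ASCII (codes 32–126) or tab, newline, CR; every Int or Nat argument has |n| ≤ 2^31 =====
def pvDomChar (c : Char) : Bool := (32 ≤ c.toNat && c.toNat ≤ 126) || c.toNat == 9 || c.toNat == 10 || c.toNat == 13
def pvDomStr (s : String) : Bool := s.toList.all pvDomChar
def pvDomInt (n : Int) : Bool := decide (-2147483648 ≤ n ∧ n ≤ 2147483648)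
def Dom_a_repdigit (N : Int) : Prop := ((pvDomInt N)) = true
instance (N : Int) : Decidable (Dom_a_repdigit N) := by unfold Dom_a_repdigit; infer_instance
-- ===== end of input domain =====

-- B replaces A's O(N) counting loop with the closed form k=(N-1)%9+1, len=(N-1)//9+1 (objective: faster).

-- ===== PORT A =====
-- inner 'for k in range(1, 10)': returns 'some s' on the early return, else the updated count.
def aRepInner (N : Int) (count : Int) (digit : Int) : List Int → Option String × Int
  | [] => (none, count)
  | k :: ks =>
    if count = N then
      (some (String.join (List.replicate (digit + 1).toNat (PySem.Int.toStr k))), count)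
    else aRepInner N (count + 1) digit ks

-- outer 'while True': fuel bounds the iterations; under Pre_ (1 ≤ N) the Python loop
-- returns within N passes, so fuel N.toNat + 1 never runs out and the port is exact.
def aRepOuter (N : Int) : Int → Int → Nat → String
  | _, _, 0 => ""
  | count, digit, fuel + 1 =>
    match aRepInner N count digit [1, 2, 3, 4, 5, 6, 7, 8, 9] with
    | (some s, _) => s
    | (none, count') => aRepOuter N count' (digit + 1) fuel

def a_repdigit (N : Int) : String := aRepOuter N 1 0 (N.toNat + 1)

-- ===== PORT B =====
-- str(k) * len ported as String.join of len.toNat copies (exact: len ≥ 1 here).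
def a_repdigit_alt (N : Int) : String :=
  String.join (List.replicate (PySem.Int.floordiv (N - 1) 9 + 1).toNat
    (PySem.Int.toStr (PySem.Int.mod (N - 1) 9 + 1)))

-- ===== PRECONDITION & SPEC =====
-- Python A never terminates for N ≤ 0 (count starts at 1 and only grows), so those inputs are excluded.
def Pre_a_repdigit (N : Int) : Prop := 1 ≤ N
instance (N : Int) : Decidable (Pre_a_repdigit N) := by unfold Pre_a_repdigit; infer_instance
def pvWitness_a_repdigit : Int := (5)

def Spec_a_repdigit (N : Int) (out : String) : Prop := out = a_repdigit_alt N
instance (N : Int) (out : String) : Decidable (Spec_a_repdigit N out) := by unfold Spec_a_repdigit; infer_instance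

-- ===== CLAIM (what is proved, stated in full; the proofs are below) =====
def Claim_equal_a_repdigit : Prop := ∀ (N : Int), Dom_a_repdigit N → Pre_a_repdigit N → Spec_a_repdigit N (a_repdigit N)

-- ===== LEMMAS AND PROOFS =====

-- the inner pass over ks starting at value k0 hits the early return iff N is within the next ks.length counts
theorem aRepInner_hit (N digit : Int) : ∀ (ks : List Int) (count : Int),
    count ≤ N → N < count + ks.length →
    aRepInner N count digit ks =
      (some (String.join (List.replicate (digit + 1).toNat
        (PySem.Int.toStr (ks[(N - count).toNat]?.getD 0)))), N) := by
  intro ks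
  induction ks with
  | nil => intro count h1 h2; simp at h2; omega
  | cons k ks ih =>
    intro count h1 h2
    by_cases hc : count = N
    · subst hc
      simp [aRepInner]
    · have h1' : count + 1 ≤ N := by omega
      rw [aRepInner, if_neg hc, ih (count + 1) h1' (by simp at h2 ⊢; omega)]
      have : (N - count).toNat = (N - (count + 1)).toNat + 1 := by omega
      simp [this]

theorem aRepInner_miss (N digit : Int) : ∀ (ks : List Int) (count : Int),
    count + ks.length ≤ N →
    aRepInner N count digit ks = (none, count + ks.length) := by
  intro ks
  induction ks with
  | nil => intro count _; simp [aRepInner]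
  | cons k ks ih =>
    intro count h
    simp only [List.length_cons] at h
    rw [aRepInner, if_neg (by omega), ih (count + 1) (by omega)]
    simp; omega

-- the digit hit in a pass starting at count is N - count + 1
theorem aRepInner_hit_val (N count digit : Int) (h1 : count ≤ N) (h2 : N < count + 9) :
    aRepInner N count digit [1, 2, 3, 4, 5, 6, 7, 8, 9] =
      (some (String.join (List.replicate (digit + 1).toNat
        (PySem.Int.toStr (N - count + 1)))), N) := by
  have hidx : (([1, 2, 3, 4, 5, 6, 7, 8, 9] : List Int)[(N - count).toNat]?).getD 0 = N - count + 1 := by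
    have h9 : (N - count).toNat < 9 := by omega
    interval_cases hi : (N - count).toNat <;> simp <;> omega
  rw [aRepInner_hit N digit _ count h1 (by simpa using h2), hidx]

theorem aRepOuter_eq (N : Int) : ∀ (fuel : Nat) (count digit : Int),
    count ≤ N → N - count < 9 * fuel →
    aRepOuter N count digit fuel =
      String.join (List.replicate (digit + (N - count) / 9 + 1).toNat
        (PySem.Int.toStr ((N - count) % 9 + 1))) := by
  intro fuel
  induction fuel with
  | zero => intro count digit h1 h2; omega
  | succ f ih =>
    intro count digit h1 h2
    by_cases hlt : N < count + 9
    · rw [aRepOuter, aRepInner_hit_val N count digit h1 hlt]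
      dsimp only
      have hd : (N - count) / 9 = 0 := by omega
      have hm : (N - count) % 9 = N - count := by omega
      rw [hd, hm]
      norm_num
    · rw [not_lt] at hlt
      rw [aRepOuter, aRepInner_miss N digit _ count (by simpa using hlt)]
      dsimp only
      rw [show (((1 :: 2 :: 3 :: 4 :: 5 :: 6 :: 7 :: 8 :: 9 :: [] : List Int)).length : Int) = 9 from by norm_num]
      rw [ih (count + 9) (digit + 1) (by omega) (by omega)]
      have hd : digit + 1 + (N - (count + 9)) / 9 = digit + (N - count) / 9 := by omega
      have hm : (N - (count + 9)) % 9 = (N - count) % 9 := by omega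
      rw [hd, hm]

-- ===== VERDICT (by name: the statement is the Claim_ definition above) =====
theorem a_repdigit_spec : Claim_equal_a_repdigit := by
  intro N _ hpre
  unfold Spec_a_repdigit a_repdigit a_repdigit_alt
  have h1 : (1 : Int) ≤ N := hpre
  rw [aRepOuter_eq N (N.toNat + 1) 1 0 h1 (by omega)]
  rw [PySem.Int.floordiv_eq_ediv_of_pos (by omega), PySem.Int.mod_eq_emod_of_pos (by omega)]
  norm_num
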